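-- pv_equiv track=rewrite | github.com/krzysiekbienias/JobHunting | src/HakerRank/GTS/math/math_problems.py | leastFactorial
-- ===== SOURCE A (Python) =====
-- def factorial(n):
--     if n == 1:
--         return 1
--     else:
--
--         return n * factorial(n - 1)
--
-- def leastFactorial(n):
--     k = 1
--
--     while factorial(k) <= n:
--         fa = factorial(k)
--         if fa >= n:
--             return factorial(k)
--         else:
--             k += 1
--     return factorial(k)
-- ===== SOURCE B (Python) =====
-- def leastFactorial(n):
--     f = 1
--     k = 1
--     while f < n:
--         k += 1
--         f *= k
--     return f
-- ===== Notes on version B (the rewrite author's own statement) =====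
-- stated objective: simpler
-- what changed: Replaces the recursive factorial recomputed three times per loop iteration with a single incremental running-product accumulator (f *= k) in one pass.
import Mathlib
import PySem

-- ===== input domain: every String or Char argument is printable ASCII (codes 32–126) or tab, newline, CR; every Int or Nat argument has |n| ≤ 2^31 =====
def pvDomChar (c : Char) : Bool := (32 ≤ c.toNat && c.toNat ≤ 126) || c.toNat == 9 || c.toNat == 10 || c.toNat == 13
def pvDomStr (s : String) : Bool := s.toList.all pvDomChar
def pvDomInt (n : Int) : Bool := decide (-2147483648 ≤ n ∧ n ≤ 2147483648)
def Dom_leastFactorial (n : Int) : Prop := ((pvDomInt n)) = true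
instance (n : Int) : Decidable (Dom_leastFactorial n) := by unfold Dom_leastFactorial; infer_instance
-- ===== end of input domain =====

-- B replaces A's repeated recursive factorial recomputation with one incremental running product (simpler, same return value).

-- ===== PORT A =====
-- Python's `factorial` recurses on n-1 until n == 1; ported with fuel n.toNat
-- (the fuel is exactly exhausted for every n ≥ 1, the only arguments A passes).
def factGo : Nat → Int → Int
  | 0, _ => 1
  | fuel + 1, n => if n = 1 then 1 else n * factGo fuel (n - 1)

def factorialA (n : Int) : Int := factGo n.toNat n

-- A's while loop, fueled: each recursive call consumes one unit; on exhaustion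
-- it returns `factorial k`, the same expression the loop would return on exit.
def loopA : Nat → Int → Int → Int
  | 0, k, _ => factorialA k
  | fuel + 1, k, n =>
      if factorialA k ≤ n then
        if factorialA k ≥ n then factorialA k else loopA fuel (k + 1) n
      else factorialA k

def leastFactorial (n : Int) : Int := loopA (n.toNat + 1) 1 n

-- ===== PORT B =====
-- Source B: f = 1; k = 1; while f < n: k += 1; f *= k; return f   (fueled the same way)
def loopB : Nat → Int → Int → Int → Int
  | 0, f, _, _ => f
  | fuel + 1, f, k, n => if f < n then loopB fuel (f * (k + 1)) (k + 1) n else f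

def leastFactorial_alt (n : Int) : Int := loopB (n.toNat + 1) 1 1 n

-- ===== PRECONDITION & SPEC =====
def Spec_leastFactorial (n : Int) (out : Int) : Prop := out = leastFactorial_alt n
instance (n : Int) (out : Int) : Decidable (Spec_leastFactorial n out) := by unfold Spec_leastFactorial; infer_instance

-- ===== CLAIM (what is proved, stated in full; the proofs are below) =====
def Claim_equal_leastFactorial : Prop := ∀ (n : Int), Dom_leastFactorial n → Spec_leastFactorial n (leastFactorial n)

-- ===== LEMMAS AND PROOFS =====

-- factorial recurrence for k ≥ 1
theorem factorialA_succ (k : Int) (hk : 1 ≤ k) :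
    factorialA (k + 1) = factorialA k * (k + 1) := by
  have hnat : (k + 1).toNat = k.toNat + 1 := by omega
  have hne : k + 1 ≠ 1 := by omega
  simp [factorialA, hnat, factGo, hne, mul_comm]

-- loop invariant: with f = factorial k, the two loops agree at every fuel
theorem loopA_eq_loopB (fuel : Nat) (k n : Int) (hk : 1 ≤ k) :
    loopA fuel k n = loopB fuel (factorialA k) k n := by
  induction fuel generalizing k with
  | zero => rfl
  | succ fuel ih =>
    by_cases h : factorialA k < n
    · have h1 : factorialA k ≤ n := le_of_lt h
      have h2 : ¬ factorialA k ≥ n := not_le.mpr h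
      simp only [loopA, loopB, if_pos h1, if_neg h2, if_pos h]
      rw [ih (k + 1) (by omega), factorialA_succ k hk]
    · have h2 : factorialA k ≥ n := not_lt.mp h
      simp only [loopA, loopB, if_neg h]
      split_ifs with h1
      · rfl
      · rfl

theorem factorialA_one : factorialA 1 = 1 := rfl

-- ===== VERDICT (by name: the statement is the Claim_ definition above) =====
theorem leastFactorial_spec : Claim_equal_leastFactorial := by
  intro n _
  unfold Spec_leastFactorial leastFactorial leastFactorial_alt
  rw [loopA_eq_loopB (n.toNat + 1) 1 n le_rfl, factorialA_one]
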